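-- pv_equiv track=rewrite | github.com/antonpictures/ANTON-SIFTA | Applications/sifta_talk_to_alice_widget.py | _is_runaway_repetition
-- ===== SOURCE A (Python) =====
-- def _is_runaway_repetition(text: str) -> bool:
--     """Return True if the tail of `text` looks degenerate.
--
--     Heuristic: search the trailing 800 chars for ANY period 3 ≤ N ≤ 80
--     such that the last block of length N repeats contiguously 5+ times.
--     Cheap (worst case ~80 × 5 char compares), no regex backtracking.
--     Catches "You said: " ×N (period 10), "the the the " (period 4), etc.
--     """
--     if not text:
--         return False
--     tail = text[-800:]
--     n = len(tail)
--     if n < 30: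
--         return False
--     max_period = min(80, n // 5)
--     for period in range(3, max_period + 1):
--         frag = tail[-period:]
--         if not frag.strip():
--             continue
--         repeats = 1
--         i = n - 2 * period
--         while i >= 0 and tail[i:i + period] == frag:
--             repeats += 1
--             i -= period
--             if repeats >= 5:
--                 return True
--     return False
-- ===== SOURCE B (Python) =====
-- def _is_runaway_repetition(text: str) -> bool:
--     """Self-overlap test: the tail ends with 5+ copies of its last `period`
--     chars iff the suffix of length 5*period equals itself shifted by `period`,
--     i.e. tail[n-5p:n-p] == tail[n-4p:] (periodicity/border property).  No
--     repeat counting, no block stepping: one slice comparison per period."""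
--     tail = text[-800:]
--     n = len(tail)
--     if n < 30:
--         return False
--     for p in range(3, min(80, n // 5) + 1):
--         if not tail[-p:].strip():
--             continue
--         if tail[n - 5 * p:n - p] == tail[n - 4 * p:]:
--             return True
--     return False
-- ===== Notes on version B (the rewrite author's own statement) =====
-- stated objective: simpler
-- what changed: The backward block-stepping while loop with its index and repeat counter is replaced, per period p, by the classic self-overlap (border) test: the length-5p suffix equals itself shifted by p, i.e. one comparison tail[n-5p:n-p] == tail[n-4p:], which by the periodicity property holds exactly when the tail ends with 5 copies of its last p chars.
import Mathlib
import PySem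

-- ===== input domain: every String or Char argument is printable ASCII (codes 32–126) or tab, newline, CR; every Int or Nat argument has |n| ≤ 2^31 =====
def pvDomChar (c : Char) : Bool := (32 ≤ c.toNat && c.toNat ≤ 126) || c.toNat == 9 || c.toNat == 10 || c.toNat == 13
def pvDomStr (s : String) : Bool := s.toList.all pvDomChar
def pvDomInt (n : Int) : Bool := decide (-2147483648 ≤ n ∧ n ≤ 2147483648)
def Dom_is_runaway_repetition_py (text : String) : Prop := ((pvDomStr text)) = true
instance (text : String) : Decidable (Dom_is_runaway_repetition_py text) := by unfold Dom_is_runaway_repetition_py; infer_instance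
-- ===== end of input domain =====

-- B replaces A's backward block-stepping repeat-counting while loop by the
-- self-overlap (border) test per period: tail[n-5p:n-p] == tail[n-4p:] (simpler).

-- ===== PORT A =====
-- the inner `while i >= 0 and tail[i:i + period] == frag:` loop (fuel = enough steps)
def aWhile (tail frag : List Char) (p : Int) : Nat → Int → Nat → Bool
  | 0, _, _ => false
  | fuel+1, i, repeats =>
    if 0 ≤ i ∧ PySem.List.slice tail (some i) (some (i + p)) = frag then
      if 5 ≤ repeats + 1 then true
      else aWhile tail frag p fuel (i - p) (repeats + 1)
    else false

-- the outer `for period in range(3, max_period + 1):` loop with its early return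
def aFor (tail : List Char) (n : Nat) : List Int → Bool
  | [] => false
  | p :: rest =>
    let frag := PySem.List.slice tail (some (-p)) none
    if PySem.Chars.strip frag = [] then aFor tail n rest
    else if aWhile tail frag p (n + 1) ((n : Int) - 2 * p) 1 then true
    else aFor tail n rest

def is_runaway_repetition_py (text : String) : Bool :=
  if text = "" then false
  else
    let tail := PySem.List.slice text.toList (some (-800)) none
    let n := tail.length
    if n < 30 then false
    else
      let maxPeriod := min 80 (n / 5)
      aFor tail n (PySem.List.pyRange 3 ((maxPeriod : Int) + 1) 1)

-- ===== PORT B =====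
-- `for p in …: if not tail[-p:].strip(): continue; if tail[n-5p:n-p] == tail[n-4p:]: return True`
def bFor (tail : List Char) (n : Int) : List Int → Bool
  | [] => false
  | p :: rest =>
    if PySem.Chars.strip (PySem.List.slice tail (some (-p)) none) = [] then bFor tail n rest
    else if PySem.List.slice tail (some (n - 5 * p)) (some (n - p)) =
            PySem.List.slice tail (some (n - 4 * p)) none then true
    else bFor tail n rest

def is_runaway_repetition_py_alt (text : String) : Bool :=
  let tail := PySem.List.slice text.toList (some (-800)) none
  let n := tail.length
  if n < 30 then false
  else bFor tail (n : Int) (PySem.List.pyRange 3 (((min 80 (n / 5) : Nat) : Int) + 1) 1)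

-- ===== PRECONDITION & SPEC =====
def Spec_is_runaway_repetition_py (text : String) (out : Bool) : Prop := out = is_runaway_repetition_py_alt text
instance (text : String) (out : Bool) : Decidable (Spec_is_runaway_repetition_py text out) := by unfold Spec_is_runaway_repetition_py; infer_instance

-- ===== CLAIM (what is proved, stated in full; the proofs are below) =====
def Claim_equal_is_runaway_repetition_py : Prop := ∀ (text : String), Dom_is_runaway_repetition_py text → Spec_is_runaway_repetition_py text (is_runaway_repetition_py text)

-- ===== LEMMAS AND PROOFS =====

-- one suffix-splitting step: drop a = (drop a).take q ++ drop (a+q)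
lemma drop_split (tail : List Char) (a q : Nat) :
    tail.drop a = (tail.drop a).take q ++ tail.drop (a + q) := by
  have h := List.take_append_drop q (tail.drop a)
  rw [List.drop_drop] at h
  exact h.symm

lemma aWhile_step_true {tail frag : List Char} {p i : Int} {r fuel : Nat}
    (h1 : 0 ≤ i) (h2 : PySem.List.slice tail (some i) (some (i + p)) = frag)
    (hr : ¬ 5 ≤ r + 1) :
    aWhile tail frag p (fuel + 1) i r = aWhile tail frag p fuel (i - p) (r + 1) := by
  simp [aWhile, h1, h2, hr]

lemma aWhile_step_done {tail frag : List Char} {p i : Int} {r fuel : Nat}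
    (h1 : 0 ≤ i) (h2 : PySem.List.slice tail (some i) (some (i + p)) = frag)
    (hr : 5 ≤ r + 1) :
    aWhile tail frag p (fuel + 1) i r = true := by
  simp [aWhile, h1, h2, hr]

lemma aWhile_step_false {tail frag : List Char} {p i : Int} {r fuel : Nat}
    (h : ¬ (0 ≤ i ∧ PySem.List.slice tail (some i) (some (i + p)) = frag)) :
    aWhile tail frag p (fuel + 1) i r = false := by
  simp only [aWhile, if_neg h]

-- the slice tail[i:i+p] at nonnegative block start, in drop/take form
lemma slice_block (tail : List Char) (q k : Nat) (hk : k * q ≤ tail.length) :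
    PySem.List.slice tail (some ((tail.length : Int) - k * q)) (some ((tail.length : Int) - k * q + q))
      = (tail.drop (tail.length - k * q)).take q := by
  have h0 : (0 : Int) ≤ (tail.length : Int) - k * q := by omega
  have h0' : (0 : Int) ≤ (tail.length : Int) - k * q + q := by omega
  rw [PySem.List.slice_toNat _ h0 h0']
  have e1 : ((tail.length : Int) - k * q).toNat = tail.length - k * q := by omega
  have e2 : ((tail.length : Int) - k * q + q).toNat = tail.length - k * q + q := by omega
  rw [e1, e2]
  congr 1
  omega

-- the heart: the counting loop is exactly the self-overlap test on the 5q-suffix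
lemma aWhile_eq_overlap (tail : List Char) (q : Nat) (h3 : 3 ≤ q)
    (h5 : 5 * q ≤ tail.length) (h30 : 30 ≤ tail.length) :
    aWhile tail (tail.drop (tail.length - q)) (q : Int) (tail.length + 1)
        ((tail.length : Int) - 2 * q) 1
      = decide (PySem.List.slice tail (some ((tail.length : Int) - 5 * q)) (some ((tail.length : Int) - q))
          = PySem.List.slice tail (some ((tail.length : Int) - 4 * q)) none) := by
  set n := tail.length with hn
  set frag := tail.drop (n - q) with hfrag
  obtain ⟨m, hm⟩ : ∃ m, n = m + 30 := ⟨n - 30, by omega⟩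
  have hfraglen : frag.length = q := by
    rw [hfrag, List.length_drop]; omega
  have hC : ∀ k : Nat, k * q ≤ n →
      PySem.List.slice tail (some ((n : Int) - k * q)) (some ((n : Int) - k * q + q))
        = (tail.drop (n - k * q)).take q := fun k hk => slice_block tail q k hk
  have hblen : ∀ k : Nat, k * q ≤ n → q ≤ k * q → ((tail.drop (n - k * q)).take q).length = q := by
    intro k hk hq
    simp only [List.length_take, List.length_drop, ← hn]
    omega
  have l2 := hblen 2 (by omega) (by omega)
  have l3 := hblen 3 (by omega) (by omega)
  have l4 := hblen 4 (by omega) (by omega)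
  have l5 := hblen 5 (by omega) (by omega)
  -- decompositions of the two slices into q-blocks
  have d5 : tail.drop (n - 5 * q) = (tail.drop (n - 5 * q)).take q ++ tail.drop (n - 4 * q) := by
    have h := drop_split tail (n - 5 * q) q; rwa [show n - 5 * q + q = n - 4 * q by omega] at h
  have d4 : tail.drop (n - 4 * q) = (tail.drop (n - 4 * q)).take q ++ tail.drop (n - 3 * q) := by
    have h := drop_split tail (n - 4 * q) q; rwa [show n - 4 * q + q = n - 3 * q by omega] at h
  have d3 : tail.drop (n - 3 * q) = (tail.drop (n - 3 * q)).take q ++ tail.drop (n - 2 * q) := by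
    have h := drop_split tail (n - 3 * q) q; rwa [show n - 3 * q + q = n - 2 * q by omega] at h
  have d2 : tail.drop (n - 2 * q) = (tail.drop (n - 2 * q)).take q ++ tail.drop (n - q) := by
    have h := drop_split tail (n - 2 * q) q; rwa [show n - 2 * q + q = n - q by omega] at h
  have dfull : tail.drop (n - 5 * q) =
      (tail.drop (n - 5 * q)).take q ++ ((tail.drop (n - 4 * q)).take q ++
        ((tail.drop (n - 3 * q)).take q ++ ((tail.drop (n - 2 * q)).take q ++ frag))) := by
    conv_lhs => rw [d5]
    conv_lhs => rw [d4]
    conv_lhs => rw [d3]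
    conv_lhs => rw [d2]
  -- the left slice of B's test, in block form
  have hL : PySem.List.slice tail (some ((n : Int) - 5 * q)) (some ((n : Int) - q))
      = (tail.drop (n - 5 * q)).take (4 * q) := by
    rw [PySem.List.slice_toNat _ (by omega) (by omega)]
    have e1 : ((n : Int) - 5 * q).toNat = n - 5 * q := by omega
    have e2 : ((n : Int) - q).toNat = n - q := by omega
    rw [e1, e2]
    congr 1
    omega
  have hLsplit : (tail.drop (n - 5 * q)).take (4 * q) ++ frag = tail.drop (n - 5 * q) := by
    have h := drop_split tail (n - 5 * q) (4 * q)
    rw [show n - 5 * q + 4 * q = n - q by omega] at h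
    exact h.symm
  have hLval : (tail.drop (n - 5 * q)).take (4 * q) =
      (tail.drop (n - 5 * q)).take q ++ ((tail.drop (n - 4 * q)).take q ++
        ((tail.drop (n - 3 * q)).take q ++ (tail.drop (n - 2 * q)).take q)) := by
    have h := hLsplit.trans dfull
    have h' : (tail.drop (n - 5 * q)).take (4 * q) ++ frag =
        ((tail.drop (n - 5 * q)).take q ++ ((tail.drop (n - 4 * q)).take q ++
          ((tail.drop (n - 3 * q)).take q ++ (tail.drop (n - 2 * q)).take q))) ++ frag := by
      rw [h]; simp [List.append_assoc]
    exact List.append_cancel_right h'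
  have hR : PySem.List.slice tail (some ((n : Int) - 4 * q)) none = tail.drop (n - 4 * q) := by
    rw [PySem.List.slice_from _ (by omega)]
    congr 1
    omega
  have dR : tail.drop (n - 4 * q) =
      (tail.drop (n - 4 * q)).take q ++ ((tail.drop (n - 3 * q)).take q ++
        ((tail.drop (n - 2 * q)).take q ++ frag)) := by
    conv_lhs => rw [d4]
    conv_lhs => rw [d3]
    conv_lhs => rw [d2]
  -- B's test ⟺ the four trailing q-blocks all equal frag
  have hrhs : (PySem.List.slice tail (some ((n : Int) - 5 * q)) (some ((n : Int) - q))
        = PySem.List.slice tail (some ((n : Int) - 4 * q)) none) ↔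
      ((tail.drop (n - 2 * q)).take q = frag ∧ (tail.drop (n - 3 * q)).take q = frag ∧
       (tail.drop (n - 4 * q)).take q = frag ∧ (tail.drop (n - 5 * q)).take q = frag) := by
    rw [hL, hR]
    constructor
    · intro h
      have h' : (tail.drop (n - 5 * q)).take q ++ ((tail.drop (n - 4 * q)).take q ++
            ((tail.drop (n - 3 * q)).take q ++ (tail.drop (n - 2 * q)).take q)) =
          (tail.drop (n - 4 * q)).take q ++ ((tail.drop (n - 3 * q)).take q ++
            ((tail.drop (n - 2 * q)).take q ++ frag)) :=
        hLval.symm.trans (h.trans dR)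
      obtain ⟨e54, h'⟩ := List.append_inj h' (l5.trans l4.symm)
      obtain ⟨e43, h'⟩ := List.append_inj h' (l4.trans l3.symm)
      obtain ⟨e32, e2f⟩ := List.append_inj h' (l3.trans l2.symm)
      exact ⟨e2f, e32.trans e2f, e43.trans (e32.trans e2f), e54.trans (e43.trans (e32.trans e2f))⟩
    · rintro ⟨f2, f3, f4, f5⟩
      rw [hLval, f2, f3, f4, f5]
      conv_rhs => rw [dR]
      rw [f2, f3, f4]
  -- A's loop ⟺ the same four blocks, by unfolding it four steps
  have hi2 : (0 : Int) ≤ (n : Int) - 2 * q := by omega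
  have hi3 : (0 : Int) ≤ (n : Int) - 3 * q := by omega
  have hi4 : (0 : Int) ≤ (n : Int) - 4 * q := by omega
  have hi5 : (0 : Int) ≤ (n : Int) - 5 * q := by omega
  have c2 : PySem.List.slice tail (some ((n : Int) - 2 * q)) (some ((n : Int) - 2 * q + q))
      = (tail.drop (n - 2 * q)).take q := by have h := hC 2 (by omega); push_cast at h ⊢; exact h
  have c3 : PySem.List.slice tail (some ((n : Int) - 3 * q)) (some ((n : Int) - 3 * q + q))
      = (tail.drop (n - 3 * q)).take q := by have h := hC 3 (by omega); push_cast at h ⊢; exact h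
  have c4 : PySem.List.slice tail (some ((n : Int) - 4 * q)) (some ((n : Int) - 4 * q + q))
      = (tail.drop (n - 4 * q)).take q := by have h := hC 4 (by omega); push_cast at h ⊢; exact h
  have c5 : PySem.List.slice tail (some ((n : Int) - 5 * q)) (some ((n : Int) - 5 * q + q))
      = (tail.drop (n - 5 * q)).take q := by have h := hC 5 (by omega); push_cast at h ⊢; exact h
  have a2 : ((n : Int) - 2 * q) - q = (n : Int) - 3 * q := by ring
  have a3 : ((n : Int) - 3 * q) - q = (n : Int) - 4 * q := by ring
  have a4 : ((n : Int) - 4 * q) - q = (n : Int) - 5 * q := by ring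
  rw [Bool.eq_iff_iff, decide_eq_true_iff, hrhs]
  have hfuel : n + 1 = (m + 30) + 1 := by omega
  have f1 : (m + 30 : Nat) = (m + 29) + 1 := by omega
  have f2 : (m + 29 : Nat) = (m + 28) + 1 := by omega
  have f3 : (m + 28 : Nat) = (m + 27) + 1 := by omega
  constructor
  · intro h
    rw [hfuel] at h
    by_cases e2 : (tail.drop (n - 2 * q)).take q = frag
    · rw [aWhile_step_true hi2 (c2.trans e2) (by omega), a2, f1] at h
      by_cases e3 : (tail.drop (n - 3 * q)).take q = frag
      · rw [aWhile_step_true hi3 (c3.trans e3) (by omega), a3, f2] at h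
        by_cases e4 : (tail.drop (n - 4 * q)).take q = frag
        · rw [aWhile_step_true hi4 (c4.trans e4) (by omega), a4, f3] at h
          by_cases e5 : (tail.drop (n - 5 * q)).take q = frag
          · exact ⟨e2, e3, e4, e5⟩
          · rw [aWhile_step_false (fun hc => e5 (c5.symm.trans hc.2))] at h
            exact absurd h Bool.false_ne_true
        · rw [aWhile_step_false (fun hc => e4 (c4.symm.trans hc.2))] at h
          exact absurd h Bool.false_ne_true
      · rw [aWhile_step_false (fun hc => e3 (c3.symm.trans hc.2))] at h
        exact absurd h Bool.false_ne_true
    · rw [aWhile_step_false (fun hc => e2 (c2.symm.trans hc.2))] at h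
      exact absurd h Bool.false_ne_true
  · rintro ⟨e2, e3, e4, e5⟩
    rw [hfuel, aWhile_step_true hi2 (c2.trans e2) (by omega), a2, f1,
        aWhile_step_true hi3 (c3.trans e3) (by omega), a3, f2,
        aWhile_step_true hi4 (c4.trans e4) (by omega), a4, f3,
        aWhile_step_done hi5 (c5.trans e5) (by omega)]

-- the two loops agree on any period list inside the admissible range
lemma aFor_eq_bFor (tail : List Char) (h30 : 30 ≤ tail.length) (ps : List Int)
    (hps : ∀ p ∈ ps, 3 ≤ p ∧ 5 * p ≤ (tail.length : Int)) :
    aFor tail tail.length ps = bFor tail (tail.length : Int) ps := by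
  induction ps with
  | nil => rfl
  | cons p rest ih =>
    have hp := hps p (List.mem_cons_self ..)
    have ihr := ih (fun x hx => hps x (List.mem_cons_of_mem _ hx))
    obtain ⟨q, rfl⟩ : ∃ q : Nat, p = (q : Int) := ⟨p.toNat, by omega⟩
    have hq3 : 3 ≤ q := by omega
    have hq5 : 5 * q ≤ tail.length := by omega
    have hfrag : PySem.List.slice tail (some (-(q : Int))) none = tail.drop (tail.length - q) :=
      PySem.List.slice_from_neg_natCast tail q (by omega)
    simp only [aFor, bFor, hfrag]
    by_cases hs : PySem.Chars.strip (tail.drop (tail.length - q)) = []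
    · simp [hs, ihr]
    · rw [if_neg hs, if_neg hs, aWhile_eq_overlap tail q hq3 hq5 h30]
      by_cases hP : PySem.List.slice tail (some ((tail.length : Int) - 5 * q)) (some ((tail.length : Int) - q))
          = PySem.List.slice tail (some ((tail.length : Int) - 4 * q)) none
      · simp [hP]
      · simp [hP, ihr]

-- ===== VERDICT (by name: the statement is the Claim_ definition above) =====
theorem is_runaway_repetition_py_spec : Claim_equal_is_runaway_repetition_py := by
  intro text _
  unfold Spec_is_runaway_repetition_py is_runaway_repetition_py is_runaway_repetition_py_alt
  by_cases he : text = ""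
  · subst he; decide
  · rw [if_neg he]
    set tail := PySem.List.slice text.toList (some (-800)) none with htail
    by_cases h30 : tail.length < 30
    · simp [h30]
    · rw [if_neg h30, if_neg h30]
      have h30' : 30 ≤ tail.length := by omega
      show aFor tail tail.length
          (PySem.List.pyRange 3 (((min 80 (tail.length / 5) : Nat) : Int) + 1) 1)
        = bFor tail (tail.length : Int)
          (PySem.List.pyRange 3 (((min 80 (tail.length / 5) : Nat) : Int) + 1) 1)
      refine aFor_eq_bFor tail h30' _ ?_
      intro p hp
      rw [PySem.List.mem_pyRange_one] at hp
      refine ⟨hp.1, ?_⟩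
      have h2 := hp.2
      omega
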